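-- pv_equiv track=rewrite | github.com/alfimovd/anagram-distance | test.py | anagram_distance_between
-- ===== SOURCE A (Python) =====
-- def anagram_distance_between(str1, str2):
--     if len(str1) != len(str2):
--         return -1
--     distance = 0
--     for letter in str1:
--         if letter in str2:
--             str2 = str2.replace(letter, '', 1)
--         else:
--             distance += 1
--     return distance
-- ===== SOURCE B (Python) =====
-- def anagram_distance_between(str1, str2):
--     if len(str1) != len(str2):
--         return -1
--     a = sorted(str1)
--     b = sorted(str2)
--     i = j = matches = 0
--     while i < len(a) and j < len(b):
--         if a[i] == b[j]:
--             matches += 1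
--             i += 1
--             j += 1
--         elif a[i] < b[j]:
--             i += 1
--         else:
--             j += 1
--     return len(str1) - matches
-- ===== Notes on version B (the rewrite author's own statement) =====
-- stated objective: faster
-- what changed: Replaces A's per-letter membership scan and replace() rebuild of str2 with sorting both strings once and counting multiset matches in a single two-pointer merge, returning len(str1) - matches.
import Mathlib
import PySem

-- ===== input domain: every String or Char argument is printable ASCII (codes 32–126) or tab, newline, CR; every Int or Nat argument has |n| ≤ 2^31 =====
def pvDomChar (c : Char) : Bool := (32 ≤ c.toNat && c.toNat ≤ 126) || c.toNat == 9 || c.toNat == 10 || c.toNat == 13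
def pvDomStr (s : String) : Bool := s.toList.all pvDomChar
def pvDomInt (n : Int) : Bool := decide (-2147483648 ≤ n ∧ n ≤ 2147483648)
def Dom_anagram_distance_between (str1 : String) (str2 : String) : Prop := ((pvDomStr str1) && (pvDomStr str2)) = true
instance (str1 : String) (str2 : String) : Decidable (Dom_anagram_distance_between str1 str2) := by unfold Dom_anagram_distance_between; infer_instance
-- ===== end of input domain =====

-- B changes the algorithm: instead of scanning str2 and rebuilding it with replace() for
-- every letter, B sorts both strings once and counts matches in one two-pointer merge.

-- ===== PORT A =====
-- A's loop: state is (remaining str2, distance). 'letter in str2' for a single char is char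
-- membership; str2.replace(letter, '', 1) with letter ∈ str2 removes the first occurrence,
-- which is exactly List.erase on the char list.
def anagramAGo : List Char → List Char → Int → Int
  | [], _, distance => distance
  | letter :: rest, s2, distance =>
    if letter ∈ s2 then anagramAGo rest (s2.erase letter) distance
    else anagramAGo rest s2 (distance + 1)

def anagram_distance_between (str1 : String) (str2 : String) : Int :=
  if str1.toList.length ≠ str2.toList.length then -1
  else anagramAGo str1.toList str2.toList 0

-- ===== PORT B =====
-- the while loop of Source B: two pointers over the two sorted lists, counting equal pairs
def anagramMerge : List Char → List Char → Int
  | [], _ => 0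
  | _ :: _, [] => 0
  | a :: xs, b :: ys =>
    if a = b then 1 + anagramMerge xs ys
    else if a < b then anagramMerge xs (b :: ys)
    else anagramMerge (a :: xs) ys
  termination_by xs ys => xs.length + ys.length

def anagram_distance_between_alt (str1 : String) (str2 : String) : Int :=
  if str1.toList.length ≠ str2.toList.length then -1
  else
    (str1.toList.length : Int) -
      anagramMerge (PySem.List.sorted str1.toList (fun x => x) false)
                   (PySem.List.sorted str2.toList (fun x => x) false)

-- ===== PRECONDITION & SPEC =====
def Spec_anagram_distance_between (str1 : String) (str2 : String) (out : Int) : Prop := out = anagram_distance_between_alt str1 str2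
instance (str1 : String) (str2 : String) (out : Int) : Decidable (Spec_anagram_distance_between str1 str2 out) := by unfold Spec_anagram_distance_between; infer_instance

-- ===== CLAIM (what is proved, stated in full; the proofs are below) =====
def Claim_equal_anagram_distance_between : Prop := ∀ (str1 : String) (str2 : String), Dom_anagram_distance_between str1 str2 → Spec_anagram_distance_between str1 str2 (anagram_distance_between str1 str2)

-- ===== LEMMAS AND PROOFS =====

-- A's loop computes d + |l1| - |l1 ∩ s2| (multiset intersection).
theorem anagramAGo_eq (l1 : List Char) : ∀ (s2 : List Char) (d : Int),
    anagramAGo l1 s2 d = d + (l1.length : Int) - (((l1 : Multiset Char) ∩ (s2 : Multiset Char)).card : Int) := by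
  induction l1 with
  | nil => intro s2 d; simp [anagramAGo]
  | cons c rest ih =>
    intro s2 d
    by_cases hc : c ∈ s2
    · have hm : c ∈ (s2 : Multiset Char) := by simpa using hc
      rw [anagramAGo, if_pos hc, ih, ← Multiset.coe_erase,
        ← Multiset.cons_coe, Multiset.cons_inter_of_pos _ hm]
      simp only [Multiset.card_cons, List.length_cons]
      push_cast; ring
    · have hm : c ∉ (s2 : Multiset Char) := by simpa using hc
      rw [anagramAGo, if_neg hc, ih,
        ← Multiset.cons_coe, Multiset.cons_inter_of_neg _ hm]
      simp only [List.length_cons]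
      push_cast; ring

-- the two-pointer merge over two sorted lists counts the multiset intersection
theorem anagramMerge_eq (xs ys : List Char)
    (hx : xs.Pairwise (· ≤ ·)) (hy : ys.Pairwise (· ≤ ·)) :
    anagramMerge xs ys = (((xs : Multiset Char) ∩ (ys : Multiset Char)).card : Int) := by
  induction xs, ys using anagramMerge.induct with
  | case1 ys => simp [anagramMerge]
  | case2 x xs => simp [anagramMerge]
  | case3 xs a ys ih =>
    rw [anagramMerge, if_pos rfl, ih hx.tail hy.tail,
      ← Multiset.cons_coe a ys, ← Multiset.cons_coe a xs,
      Multiset.cons_inter_of_pos _ (Multiset.mem_cons_self a _),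
      Multiset.erase_cons_head]
    simp only [Multiset.card_cons]
    push_cast; ring
  | case4 a xs b ys hne hlt ih =>
    have hnm : a ∉ ((b :: ys : List Char) : Multiset Char) := by
      simp only [Multiset.mem_coe, List.mem_cons]
      rintro (rfl | hmem)
      · exact hne rfl
      · exact absurd ((List.pairwise_cons.mp hy).1 _ hmem) (not_le.mpr hlt)
    rw [anagramMerge, if_neg hne, if_pos hlt, ih hx.tail hy,
      ← Multiset.cons_coe a xs, Multiset.cons_inter_of_neg _ hnm]
  | case5 a xs b ys hne hnlt ih =>
    have hba : b < a := lt_of_le_of_ne (not_lt.mp hnlt) (fun h => hne h.symm)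
    have hnm : b ∉ ((a :: xs : List Char) : Multiset Char) := by
      simp only [Multiset.mem_coe, List.mem_cons]
      rintro (rfl | hmem)
      · exact hne rfl
      · exact absurd ((List.pairwise_cons.mp hx).1 _ hmem) (not_le.mpr hba)
    rw [anagramMerge, if_neg hne, if_neg hnlt, ih hx hy.tail,
      show ((a :: xs : List Char) : Multiset Char) ∩ ((b :: ys : List Char) : Multiset Char)
          = ((a :: xs : List Char) : Multiset Char) ∩ ((ys : List Char) : Multiset Char) from by
        rw [Multiset.inter_comm, ← Multiset.cons_coe b ys,
          Multiset.cons_inter_of_neg _ hnm, Multiset.inter_comm]]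

theorem sorted_coe_eq (l : List Char) :
    ((PySem.List.sorted l (fun x => x) false : List Char) : Multiset Char) = (l : Multiset Char) :=
  Quot.sound (PySem.List.sorted_perm l (fun x => x) false)

-- ===== VERDICT (by name: the statement is the Claim_ definition above) =====
theorem anagram_distance_between_spec : Claim_equal_anagram_distance_between := by
  intro str1 str2 _
  unfold Spec_anagram_distance_between anagram_distance_between anagram_distance_between_alt
  by_cases hlen : str1.toList.length ≠ str2.toList.length
  · rw [if_pos hlen, if_pos hlen]
  · rw [if_neg hlen, if_neg hlen,
      anagramAGo_eq,
      anagramMerge_eq _ _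
        (by simpa using PySem.List.sorted_pairwise str1.toList (fun x => x))
        (by simpa using PySem.List.sorted_pairwise str2.toList (fun x => x)),
      sorted_coe_eq, sorted_coe_eq]
    ring
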